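-- pv_equiv track=rewrite | github.com/jasminenoack-ai-agents/project-euler-python | ai-solutions/problem002_cursed.py | solve
-- ===== SOURCE A (Python) =====
-- def _digit_sum_base7(n: int) -> int:
--     """Return the sum of digits of ``n`` when represented in base 7."""
--     total = 0
--     while n:
--         total += n % 7
--         n //= 7
--     return total
--
-- def _is_prime(n: int) -> bool:
--     """Return ``True`` if ``n`` is a prime number."""
--     if n < 2:
--         return False
--     if n in (2, 3):
--         return True
--     if n % 2 == 0:
--         return False
--     i = 3
--     while i * i <= n:
--         if n % i == 0:
--             return False
--         i += 2
--     return True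
--
-- def solve(limit: int = 4_000_000) -> int:
--     """Return the modified Fibonacci sum up to ``limit``."""
--     total = 0
--     a, b = 1, 2
--     while a <= limit:
--         if a % 2 == 0 and _is_prime(_digit_sum_base7(a)):
--             total += a
--         a, b = b, a + b
--     return total
-- ===== SOURCE B (Python) =====
-- def _digit_sum_base7(n: int) -> int:
--     """Return the sum of digits of ``n`` when represented in base 7."""
--     digits = []
--     while n:
--         digits.append(n % 7)
--         n //= 7
--     return sum(digits)
--
-- def _is_prime(n: int) -> bool:
--     """Return ``True`` if ``n`` is a prime number (full trial division)."""
--     return n >= 2 and all(n % d for d in range(2, n))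
--
-- def solve(limit: int = 4_000_000) -> int:
--     """Collect the even Fibonacci numbers <= limit via E_k = 4*E_{k-1} + E_{k-2},
--     then sum the qualifying ones in a second pass."""
--     evens = []
--     e, f = 2, 8
--     while e <= limit:
--         evens.append(e)
--         e, f = f, 4 * f + e
--     return sum(x for x in evens if _is_prime(_digit_sum_base7(x)))
-- ===== Notes on version B (the rewrite author's own statement) =====
-- stated objective: alternative
-- what changed: B stages the computation: it first builds the list of even Fibonacci numbers <= limit directly via E_k = 4*E_{k-1} + E_{k-2} (seeded 2, 8, no parity test), then sums the ones whose base-7 digit sum is prime in a second filtering pass; the digit-sum helper collects a digit list and sums it, and primality is a direct all() over range(2, n) instead of A's odd-step sqrt-bounded while loop.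
import Mathlib
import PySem

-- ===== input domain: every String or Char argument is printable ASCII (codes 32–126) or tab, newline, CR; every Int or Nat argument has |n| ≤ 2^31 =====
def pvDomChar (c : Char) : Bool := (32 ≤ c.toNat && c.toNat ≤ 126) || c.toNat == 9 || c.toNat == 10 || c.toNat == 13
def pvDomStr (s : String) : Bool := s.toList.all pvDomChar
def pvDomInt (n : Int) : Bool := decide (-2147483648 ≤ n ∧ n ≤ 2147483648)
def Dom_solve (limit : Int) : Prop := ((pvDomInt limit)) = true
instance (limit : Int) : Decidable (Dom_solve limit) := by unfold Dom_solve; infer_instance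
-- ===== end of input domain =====

-- B stages the computation: build the list of even Fibonacci numbers <= limit via
-- E_k = 4*E_{k-1} + E_{k-2} (seeded 2, 8), then filter-and-sum in a second pass;
-- its helpers collect a digit list and sum it, and test primality by full trial division.
-- All while-loops are ported with a fuel argument that is a totality guard only: each caller
-- passes fuel at least the loop's iteration count, so fuel never changes the computed value.

-- ===== PORT A =====
-- `while n:` accumulator loop of A's _digit_sum_base7, fuel n.toNat (for n > 0 the value
-- strictly decreases; Python diverges for n < 0, unreachable from solve)
def digitSum7Loop : Nat → Int → Int → Int
  | 0, _, total => total
  | fuel + 1, n, total =>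
    if n = 0 then total
    else digitSum7Loop fuel (PySem.Int.floordiv n 7) (total + PySem.Int.mod n 7)

def digitSum7 (n : Int) : Int := digitSum7Loop n.toNat n 0

-- trial-division loop of A's _is_prime: i = 3, 5, 7, … while i*i <= n; fuel n.toNat
def isPrimeLoop : Nat → Int → Int → Bool
  | 0, _, _ => true
  | fuel + 1, n, i =>
    if i * i ≤ n then
      if PySem.Int.mod n i = 0 then false else isPrimeLoop fuel n (i + 2)
    else true

def isPrime (n : Int) : Bool :=
  if n < 2 then false
  else if n = 2 ∨ n = 3 then true
  else if PySem.Int.mod n 2 = 0 then false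
  else isPrimeLoop n.toNat n 3

-- A's main loop over all Fibonacci numbers; a starts at 1 and strictly increases, so at most
-- limit iterations run and fuel (limit+1).toNat suffices.
def solveLoopA : Nat → Int → Int → Int → Int → Int
  | 0, _, _, _, total => total
  | fuel + 1, limit, a, b, total =>
    if a ≤ limit then
      solveLoopA fuel limit b (a + b)
        (if PySem.Int.mod a 2 = 0 ∧ isPrime (digitSum7 a) then total + a else total)
    else total

def solve (limit : Int) : Int := solveLoopA (limit + 1).toNat limit 1 2 0

-- ===== PORT B =====
-- B's _digit_sum_base7: collect the digit list, then sum it (fuel n.toNat as above)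
def digitListLoop : Nat → Int → List Int → List Int
  | 0, _, digits => digits
  | fuel + 1, n, digits =>
    if n = 0 then digits
    else digitListLoop fuel (PySem.Int.floordiv n 7) (digits ++ [PySem.Int.mod n 7])

def digitSum7B (n : Int) : Int := (digitListLoop n.toNat n []).foldl (· + ·) 0

-- B's _is_prime: n >= 2 and all(n % d for d in range(2, n))
def isPrimeB (n : Int) : Bool :=
  decide (2 ≤ n) && (PySem.List.pyRange 2 n 1).all (fun d => decide (PySem.Int.mod n d ≠ 0))

-- B's first pass: the list of even Fibonacci numbers <= limit (e, f = f, 4*f + e);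
-- e starts at 2 and strictly increases, so fuel (limit+1).toNat suffices.
def evenFibs : Nat → Int → Int → Int → List Int
  | 0, _, _, _ => []
  | fuel + 1, limit, e, f =>
    if e ≤ limit then e :: evenFibs fuel limit f (4 * f + e) else []

-- B's second pass: sum(x for x in evens if _is_prime(_digit_sum_base7(x)))
def solve_alt (limit : Int) : Int :=
  ((evenFibs (limit + 1).toNat limit 2 8).filter
    (fun x => isPrimeB (digitSum7B x))).foldl (· + ·) 0

-- ===== PRECONDITION & SPEC =====
def Spec_solve (limit : Int) (out : Int) : Prop := out = solve_alt limit
instance (limit : Int) (out : Int) : Decidable (Spec_solve limit out) := by unfold Spec_solve; infer_instance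

-- ===== CLAIM (what is proved, stated in full; the proofs are below) =====
def Claim_equal_solve : Prop := ∀ (limit : Int), Dom_solve limit → Spec_solve limit (solve limit)

-- ===== LEMMAS AND PROOFS =====

-- A's accumulator digit-sum loop equals summing B's digit list
theorem digitListLoop_sum (fuel : Nat) : ∀ (n : Int) (ds : List Int) (t : Int),
    (digitListLoop fuel n ds).foldl (· + ·) t = digitSum7Loop fuel n (ds.foldl (· + ·) t) := by
  induction fuel with
  | zero => intro n ds t; simp [digitListLoop, digitSum7Loop]
  | succ fuel ih =>
    intro n ds t
    by_cases h : n = 0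
    · simp [digitListLoop, digitSum7Loop, h]
    · simp only [digitListLoop, digitSum7Loop, h, if_false]
      rw [ih]
      simp [List.foldl_append]

theorem digitSum7_eq (n : Int) : digitSum7 n = digitSum7B n := by
  rw [digitSum7, digitSum7B, digitListLoop_sum]
  rfl

-- characterization of A's odd-step trial-division loop
theorem isPrimeLoop_char (fuel : Nat) : ∀ (n i : Int), 3 ≤ i → (n + 1 - i * i).toNat ≤ fuel →
    (isPrimeLoop fuel n i = true ↔
      ∀ j : Int, i ≤ j → 2 ∣ (j - i) → j * j ≤ n → PySem.Int.mod n j ≠ 0) := by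
  induction fuel with
  | zero =>
    intro n i hi hf
    simp only [isPrimeLoop, true_iff]
    intro j hij _ hjj _
    have : i * i ≤ j * j := by nlinarith
    omega
  | succ fuel ih =>
    intro n i hi hf
    by_cases hii : i * i ≤ n
    · by_cases hmod : PySem.Int.mod n i = 0
      · simp only [isPrimeLoop, if_pos hii, if_pos hmod]
        constructor
        · intro h; exact absurd h (by simp)
        · intro h
          exact absurd hmod (h i le_rfl (by omega) hii)
      · simp only [isPrimeLoop, if_pos hii, if_neg hmod]
        have hsq : i * i + 16 ≤ (i + 2) * (i + 2) := by nlinarith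
        rw [ih n (i + 2) (by omega) (by omega)]
        constructor
        · intro h j hij hd hjj
          by_cases hji : j = i
          · subst hji; exact hmod
          · exact h j (by omega) (by omega) hjj
        · intro h j hij hd hjj
          exact h j (by omega) (by omega) hjj
    · simp only [isPrimeLoop, if_neg hii, true_iff]
      intro j hij _ hjj _
      have : i * i ≤ j * j := by nlinarith
      omega

-- characterization of B's full trial division
theorem isPrimeB_iff (n : Int) : isPrimeB n = true ↔
    2 ≤ n ∧ ∀ d : Int, 2 ≤ d → d < n → PySem.Int.mod n d ≠ 0 := by
  simp only [isPrimeB, Bool.and_eq_true, List.all_eq_true, decide_eq_true_eq]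
  constructor
  · rintro ⟨h2, hall⟩
    exact ⟨h2, fun d hd1 hd2 => hall d ((PySem.List.mem_pyRange_one).2 ⟨hd1, hd2⟩)⟩
  · rintro ⟨h2, hall⟩
    refine ⟨h2, fun d hd => ?_⟩
    obtain ⟨hd1, hd2⟩ := (PySem.List.mem_pyRange_one).1 hd
    exact hall d hd1 hd2

-- the two primality tests agree on every integer
theorem isPrime_eq (n : Int) : isPrime n = isPrimeB n := by
  by_cases hlt : n < 2
  · have hB : ¬ isPrimeB n = true := by
      rw [isPrimeB_iff]; rintro ⟨h, -⟩; omega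
    simp only [Bool.not_eq_true] at hB
    rw [isPrime, if_pos hlt, hB]
  · rw [Int.not_lt] at hlt
    by_cases h23 : n = 2 ∨ n = 3
    · rcases h23 with rfl | rfl <;> decide
    · rw [isPrime, if_neg (by omega), if_neg h23]
      have hn4 : 4 ≤ n := by omega
      have hmod2 : PySem.Int.mod n 2 = n % 2 :=
        PySem.Int.mod_eq_emod_of_pos (by omega)
      by_cases heven : n % 2 = 0
      · rw [if_pos (by omega : PySem.Int.mod n 2 = 0)]
        symm
        rw [← Bool.not_eq_true, isPrimeB_iff]
        rintro ⟨-, hall⟩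
        refine hall 2 le_rfl (by omega) ?_
        rw [hmod2]; omega
      · have hodd : n % 2 = 1 := by omega
        rw [if_neg (by omega : ¬ PySem.Int.mod n 2 = 0)]
        have hn5 : 5 ≤ n := by omega
        rw [Bool.eq_iff_iff, isPrimeLoop_char n.toNat n 3 (by omega) (by omega),
          isPrimeB_iff]
        constructor
        · -- B's condition from A's: a small divisor gives an odd divisor j with j*j ≤ n
          intro hA
          refine ⟨by omega, fun d hd2 hdn hmd => ?_⟩
          have hdvd : d ∣ n := (PySem.Int.mod_eq_zero_iff_dvd n d).1 hmd
          have hdodd : d % 2 = 1 := by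
            rcases Int.emod_two_eq d with h | h
            · exfalso
              have : (2 : Int) ∣ n := dvd_trans (by omega) hdvd
              omega
            · exact h
          have hd3 : 3 ≤ d := by omega
          obtain ⟨e, he⟩ := hdvd
          have he2 : 2 ≤ e := by
            have hepos : 0 < e := by nlinarith
            have : e ≠ 1 := by rintro rfl; omega
            omega
          have heodd : e % 2 = 1 := by
            rcases Int.emod_two_eq e with h | h
            · exfalso
              have : (2 : Int) ∣ n := he ▸ Dvd.dvd.mul_left (by omega) d
              omega
            · exact h
          have he3 : 3 ≤ e := by omega
          rcases le_total d e with hde | hde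
          · refine hA d hd3 (by omega) (by nlinarith) ?_
            exact (PySem.Int.mod_eq_zero_iff_dvd n d).2 ⟨e, he⟩
          · refine hA e he3 (by omega) (by nlinarith) ?_
            exact (PySem.Int.mod_eq_zero_iff_dvd n e).2 ⟨d, by linarith [he, mul_comm d e]⟩
        · -- A's condition from B's: any candidate j is itself a divisor in [2, n)
          rintro ⟨-, hB⟩ j hj3 _ hjj
          have hjn : j < n := by nlinarith
          exact hB j (by omega) hjn
      
theorem loopA_stop (fuel : Nat) (limit a b t : Int) (h : limit < a) :
    solveLoopA fuel limit a b t = t := by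
  cases fuel with
  | zero => rfl
  | succ fuel => rw [solveLoopA, if_neg (by omega)]

theorem evenFibs_stop (fuel : Nat) (limit e f : Int) (h : limit < e) :
    evenFibs fuel limit e f = [] := by
  cases fuel with
  | zero => rfl
  | succ fuel => rw [evenFibs, if_neg (by omega)]

-- key invariant: A's loop from an even Fibonacci a = e with odd successor b equals summing
-- B's filtered even-Fibonacci list from e with next even value e + 2*b (the intermediate odd
-- Fibonacci numbers b and e + b contribute nothing to A's total), for any sufficient fuels
theorem loopA_eq_list (fB : Nat) : ∀ (fA : Nat) (limit e b t : Int),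
    0 < e → e < b → e % 2 = 0 → b % 2 = 1 →
    (limit + 1 - e).toNat ≤ fA → (limit + 1 - e).toNat ≤ fB →
    solveLoopA fA limit e b t =
      ((evenFibs fB limit e (e + 2 * b)).filter
        (fun x => isPrimeB (digitSum7B x))).foldl (· + ·) t := by
  induction fB with
  | zero =>
    intro fA limit e b t he heb h2 hb2 hfA hfB
    rw [loopA_stop fA limit e b t (by omega)]
    rfl
  | succ fB ih =>
    intro fA limit e b t he heb h2 hb2 hfA hfB
    by_cases h : e ≤ limit
    · obtain ⟨fA1, rfl⟩ : ∃ k, fA = k + 1 := ⟨fA - 1, by omega⟩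
      rw [solveLoopA, if_pos h, evenFibs, if_pos h]
      have hme : PySem.Int.mod e 2 = 0 := by
        rw [PySem.Int.mod_eq_emod_of_pos (show (0:Int) < 2 by omega)]; omega
      rw [List.filter_cons]
      have hpe : (PySem.Int.mod e 2 = 0 ∧ isPrime (digitSum7 e)) ↔
          isPrimeB (digitSum7B e) = true := by
        rw [digitSum7_eq, isPrime_eq]
        exact ⟨fun h => h.2, fun h => ⟨hme, h⟩⟩
      have hstep :
          (if PySem.Int.mod e 2 = 0 ∧ isPrime (digitSum7 e) then t + e else t) =
          (if isPrimeB (digitSum7B e) = true then t + e else t) := by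
        by_cases hp : isPrimeB (digitSum7B e) = true
        · rw [if_pos (hpe.2 hp), if_pos hp]
        · rw [if_neg (fun hc => hp (hpe.1 hc)), if_neg hp]
      set t1 := if isPrimeB (digitSum7B e) = true then t + e else t with ht1
      have hfoldl :
          ∀ l : List Int,
            ((if isPrimeB (digitSum7B e) = true then e :: l else l).foldl (· + ·) t) =
              l.foldl (· + ·) t1 := by
        intro l
        by_cases hp : isPrimeB (digitSum7B e) = true
        · rw [if_pos hp, ht1, if_pos hp]; rfl
        · rw [if_neg hp, ht1, if_neg hp]
      rw [hstep, hfoldl]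
      by_cases hb : b ≤ limit
      · obtain ⟨fA2, rfl⟩ : ∃ k, fA1 = k + 1 := ⟨fA1 - 1, by omega⟩
        rw [solveLoopA, if_pos hb]
        have hmb : ¬ (PySem.Int.mod b 2 = 0 ∧ isPrime (digitSum7 b)) := by
          rw [PySem.Int.mod_eq_emod_of_pos (show (0:Int) < 2 by omega)]
          rintro ⟨hc, -⟩; omega
        rw [if_neg hmb]
        by_cases heb' : e + b ≤ limit
        · obtain ⟨fA3, rfl⟩ : ∃ k, fA2 = k + 1 := ⟨fA2 - 1, by omega⟩
          rw [solveLoopA, if_pos heb']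
          have hmeb : ¬ (PySem.Int.mod (e + b) 2 = 0 ∧ isPrime (digitSum7 (e + b))) := by
            rw [PySem.Int.mod_eq_emod_of_pos (show (0:Int) < 2 by omega)]
            rintro ⟨hc, -⟩; omega
          rw [if_neg hmeb]
          have := ih fA3 limit (b + (e + b)) ((e + b) + (b + (e + b))) t1
            (by omega) (by omega) (by omega) (by omega) (by omega) (by omega)
          have g2 : 4 * (e + 2 * b) + e = b + (e + b) + 2 * ((e + b) + (b + (e + b))) := by
            ring
          have g1 : e + 2 * b = b + (e + b) := by ring
          rw [g2, g1]
          exact this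
        · rw [loopA_stop _ _ _ _ _ (by omega),
              evenFibs_stop _ _ _ _ (by omega)]
          rfl
      · rw [loopA_stop _ _ _ _ _ (by omega),
            evenFibs_stop _ _ _ _ (by omega)]
        rfl
    · rw [loopA_stop _ _ _ _ _ (by omega), evenFibs_stop _ _ _ _ (by omega)]
      rfl

-- ===== VERDICT (by name: the statement is the Claim_ definition above) =====
theorem solve_spec : Claim_equal_solve := by
  intro limit _
  show solve limit = solve_alt limit
  rw [solve, solve_alt]
  by_cases h1 : (1 : Int) ≤ limit
  · obtain ⟨k, hk⟩ : ∃ k, (limit + 1).toNat = k + 1 := ⟨limit.toNat, by omega⟩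
    rw [hk, solveLoopA, if_pos h1]
    have hm1 : ¬ (PySem.Int.mod 1 2 = 0 ∧ isPrime (digitSum7 1)) := by
      rintro ⟨hc, -⟩; revert hc; decide
    rw [if_neg hm1]
    have := loopA_eq_list (k + 1) k limit 2 (1 + 2) 0
      (by omega) (by omega) (by omega) (by omega) (by omega) (by omega)
    have e2 : (2 : Int) + 2 * (1 + 2) = 8 := by norm_num
    rw [e2] at this
    exact this
  · rw [loopA_stop _ _ _ _ _ (by omega), evenFibs_stop _ _ _ _ (by omega)]
    rfl
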